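-- pv_equiv track=rewrite | github.com/rafix7742/CREATE-csca08-f24 | solution_dict_tuple.py | fastest_total_time
-- ===== SOURCE A (Python) =====
-- from typing import Tuple
--
-- BIG_NUMBER = 999999999
--
-- def get_total_time(contestants: dict) -> list[Tuple]:
--
--     times = []
--     # get list of all contestant names (keys for later)
--     contestant_names = list(contestants.keys())
--     i = 0
--     while i < len(contestant_names):
--         # get the contestant individually to use as a key for events
--         contestant = contestant_names[i]
--         events = contestants[contestant]
--
--         total_time = 0
--         j = 0
--         while j < len(events):
--             # start summing the time of the contestant
--             time = events[j][1]
--             total_time += time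
--             j += 1
--         # append their name and time in a list of tuples
--         times.append((contestant, total_time))
--         i += 1
--
--     return times
--
-- def fastest_total_time(contestants: dict) -> str:
--
--     #Helper function to be created above
--     total_times = get_total_time(contestants)
--     #Helper function to be created above
--
--     smallest_time = BIG_NUMBER
--     fastest_contestant = ""
--
--     idx = 0
--     while idx < len(total_times):
--         contestant = (total_times[idx][0],total_times[idx][1])
--         if contestant[1] < smallest_time:
--             smallest_time = contestant[1]
--             fastest_contestant = contestant[0]
--         idx += 1
--
--     return fastest_contestant
-- ===== SOURCE B (Python) =====
-- BIG_NUMBER = 999999999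
--
-- def fastest_total_time(contestants: dict) -> str:
--     # single pass, no helper and no intermediate list of (name, total) tuples
--     smallest_time = BIG_NUMBER
--     fastest_contestant = ""
--     for contestant, events in contestants.items():
--         total = sum(event[1] for event in events)
--         if total < smallest_time:
--             smallest_time = total
--             fastest_contestant = contestant
--     return fastest_contestant
-- ===== Notes on version B (the rewrite author's own statement) =====
-- stated objective: simpler
-- what changed: Fused A's two passes (helper building a (name,total) list, then a scan for the minimum) into one loop over contestants.items() that sums each contestant's times inline and keeps the running best, removing the helper, the intermediate list and the key-list/dict-lookup indirection.
import Mathlib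
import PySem

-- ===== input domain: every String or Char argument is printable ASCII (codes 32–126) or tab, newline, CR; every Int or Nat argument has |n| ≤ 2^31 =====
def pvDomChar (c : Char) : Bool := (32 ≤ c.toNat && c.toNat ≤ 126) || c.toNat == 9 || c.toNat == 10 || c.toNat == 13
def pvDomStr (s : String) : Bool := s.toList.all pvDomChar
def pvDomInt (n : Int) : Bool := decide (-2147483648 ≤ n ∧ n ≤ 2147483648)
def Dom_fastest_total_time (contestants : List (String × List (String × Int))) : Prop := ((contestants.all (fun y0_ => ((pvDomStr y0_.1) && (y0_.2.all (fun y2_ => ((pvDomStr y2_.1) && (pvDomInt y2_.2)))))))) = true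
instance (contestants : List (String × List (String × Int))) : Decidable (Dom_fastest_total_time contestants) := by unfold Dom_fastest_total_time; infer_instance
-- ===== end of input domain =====

-- B fuses A's helper pass (building a (name,total) list) and the minimum scan into one
-- single-pass fold with no intermediate list (objective: simpler).


-- ===== PORT A =====
-- helper get_total_time: iterates over the key list, looks each contestant up in the
-- dict (first match), sums the event times and appends (name, total).
def get_total_time (contestants : List (String × List (String × Int))) : List (String × Int) :=
  (contestants.map (·.1)).foldl
    (fun times contestant =>
      let events := ((PySem.Dict.mk contestants).get? contestant).getD []
      let total_time := events.foldl (fun t e => t + e.2) 0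
      times ++ [(contestant, total_time)])
    []

def fastest_total_time (contestants : List (String × List (String × Int))) : String :=
  let total_times := get_total_time contestants
  (total_times.foldl
    (fun (st : Int × String) c => if c.2 < st.1 then (c.2, c.1) else st)
    (999999999, "")).2

-- ===== PORT B =====
def fastest_total_time_alt (contestants : List (String × List (String × Int))) : String :=
  (contestants.foldl
    (fun (st : Int × String) p =>
      let total := p.2.foldl (fun t e => t + e.2) 0
      if total < st.1 then (total, p.1) else st)
    (999999999, "")).2

-- ===== PRECONDITION & SPEC =====
-- Pre_ excludes association lists with duplicate keys: those do not represent any Python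
-- dict (A's parameter), so A is never called on them.
def Pre_fastest_total_time (contestants : List (String × List (String × Int))) : Prop :=
  (contestants.map (·.1)).Nodup
instance (contestants : List (String × List (String × Int))) : Decidable (Pre_fastest_total_time contestants) := by unfold Pre_fastest_total_time; infer_instance

def pvWitness_fastest_total_time : (List (String × List (String × Int))) :=
  [("amy", [("run", 3), ("swim", 4)]), ("bob", [("run", 2)])]

def Spec_fastest_total_time (contestants : List (String × List (String × Int))) (out : String) : Prop := out = fastest_total_time_alt contestants
instance (contestants : List (String × List (String × Int))) (out : String) : Decidable (Spec_fastest_total_time contestants out) := by unfold Spec_fastest_total_time; infer_instance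

-- ===== CLAIM (what is proved, stated in full; the proofs are below) =====
def Claim_equal_fastest_total_time : Prop := ∀ (contestants : List (String × List (String × Int))), Dom_fastest_total_time contestants → Pre_fastest_total_time contestants → Spec_fastest_total_time contestants (fastest_total_time contestants)

-- ===== LEMMAS AND PROOFS =====

-- The key-list fold of get_total_time, for any prefix l of pairs whose lookups are exact.
lemma gtt_fold_eq (d : PySem.Dict String (List (String × Int)))
    (l : List (String × List (String × Int)))
    (hl : ∀ p ∈ l, d.get? p.1 = some p.2) (acc : List (String × Int)) :
    (l.map (·.1)).foldl
      (fun times contestant =>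
        let events := (d.get? contestant).getD []
        let total_time := events.foldl (fun t e => t + e.2) 0
        times ++ [(contestant, total_time)]) acc
    = acc ++ l.map (fun p => (p.1, p.2.foldl (fun t e => t + e.2) 0)) := by
  induction l generalizing acc with
  | nil => simp
  | cons p rest ih =>
    simp only [List.map_cons, List.foldl_cons]
    rw [hl p (by simp), ih (fun q hq => hl q (by simp [hq]))]
    simp

lemma gtt_eq (contestants : List (String × List (String × Int)))
    (h : (contestants.map (·.1)).Nodup) :
    get_total_time contestants
      = contestants.map (fun p => (p.1, p.2.foldl (fun t e => t + e.2) 0)) := by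
  unfold get_total_time
  rw [gtt_fold_eq]
  · simp
  · intro p hp
    exact PySem.Dict.get?_of_mem_items _ hp (by simpa [PySem.Dict.keys] using h)

-- ===== VERDICT (by name: the statement is the Claim_ definition above) =====
theorem fastest_total_time_spec : Claim_equal_fastest_total_time := by
  intro contestants _ hpre
  unfold Spec_fastest_total_time fastest_total_time fastest_total_time_alt
  rw [gtt_eq contestants hpre]
  simp only [List.foldl_map]
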